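-- pv_equiv track=rewrite | github.com/SamHaoYuan/pitf | pitf.py | _calc_number_of_dimensions
-- ===== SOURCE A (Python) =====
-- def _calc_number_of_dimensions(data, validation):
--     """
--     *计算数据集中，user,item,tag最大数量（数据维度，data_shape)
--     :param data:
--     :param validation:
--     :return:
--     """
--     u_max = -1
--     i_max = -1
--     t_max = -1
--     for u, i, t in data:
--         if u > u_max: u_max = u
--         if i > i_max: i_max = i
--         if t > t_max: t_max = t
--     if not validation is None:
--         for u, i, t in validation:
--             if u > u_max: u_max = u
--             if i > i_max: i_max = i
--             if t > t_max: t_max = t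
--     return (u_max+1, i_max+1, t_max+1)
-- ===== SOURCE B (Python) =====
-- def _calc_number_of_dimensions(data, validation):
--     # One sentinel row (-1,-1,-1) plays the role of the initial accumulators;
--     # then each dimension is an independent column-wise max reduction.
--     rows = [(-1, -1, -1)] + list(data) + (list(validation) if validation is not None else [])
--     return (max(u for u, i, t in rows) + 1,
--             max(i for u, i, t in rows) + 1,
--             max(t for u, i, t in rows) + 1)
-- ===== Notes on version B (the rewrite author's own statement) =====
-- stated objective: idiomatic
-- what changed: Replaces the fused three-accumulator loop (with explicit if-greater updates over data and then validation) by one concatenated row list and three independent column-wise max reductions with default=-1.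
import Mathlib
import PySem

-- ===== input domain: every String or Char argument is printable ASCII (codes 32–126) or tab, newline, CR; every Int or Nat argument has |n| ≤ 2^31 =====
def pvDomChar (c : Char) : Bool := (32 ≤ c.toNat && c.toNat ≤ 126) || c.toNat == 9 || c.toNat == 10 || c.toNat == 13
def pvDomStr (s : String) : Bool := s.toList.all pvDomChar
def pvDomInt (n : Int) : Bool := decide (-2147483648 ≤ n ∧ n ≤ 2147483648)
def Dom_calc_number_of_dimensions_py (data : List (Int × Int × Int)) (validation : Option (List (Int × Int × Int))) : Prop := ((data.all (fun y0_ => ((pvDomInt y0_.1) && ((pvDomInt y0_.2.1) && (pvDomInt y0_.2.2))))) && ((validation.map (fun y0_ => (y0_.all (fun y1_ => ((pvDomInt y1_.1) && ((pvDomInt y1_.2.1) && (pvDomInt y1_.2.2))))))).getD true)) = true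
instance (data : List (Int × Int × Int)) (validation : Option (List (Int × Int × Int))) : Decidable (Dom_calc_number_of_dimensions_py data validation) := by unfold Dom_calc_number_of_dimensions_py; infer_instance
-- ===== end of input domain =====

-- B replaces A's fused three-accumulator loop by a sentinel-seeded row list and
-- three independent column-wise max reductions (objective: idiomatic; same cost).

-- ===== PORT A =====
-- one body of A's loop: update each running max if the new component is greater
def pvStepA (s : Int × Int × Int) (r : Int × Int × Int) : Int × Int × Int :=
  (if r.1 > s.1 then r.1 else s.1,
   if r.2.1 > s.2.1 then r.2.1 else s.2.1,
   if r.2.2 > s.2.2 then r.2.2 else s.2.2)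

def calc_number_of_dimensions_py (data : List (Int × Int × Int)) (validation : Option (List (Int × Int × Int))) : Int × Int × Int :=
  let s1 := data.foldl pvStepA (-1, -1, -1)
  let s2 := match validation with
    | none => s1
    | some v => v.foldl pvStepA s1
  (s2.1 + 1, s2.2.1 + 1, s2.2.2 + 1)

-- ===== PORT B =====
def calc_number_of_dimensions_py_alt (data : List (Int × Int × Int)) (validation : Option (List (Int × Int × Int))) : Int × Int × Int :=
  let rows : List (Int × Int × Int) :=
    (-1, -1, -1) :: (data ++ (match validation with | some v => v | none => []))
  -- Python max(nonempty iterable); rows is nonempty, so the .getD default is unreachable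
  ((PySem.List.max? (rows.map (fun r => r.1)) (fun y => y)).getD 0 + 1,
   (PySem.List.max? (rows.map (fun r => r.2.1)) (fun y => y)).getD 0 + 1,
   (PySem.List.max? (rows.map (fun r => r.2.2)) (fun y => y)).getD 0 + 1)

-- ===== PRECONDITION & SPEC =====
def Spec_calc_number_of_dimensions_py (data : List (Int × Int × Int)) (validation : Option (List (Int × Int × Int))) (out : Int × Int × Int) : Prop := out = calc_number_of_dimensions_py_alt data validation
instance (data : List (Int × Int × Int)) (validation : Option (List (Int × Int × Int))) (out : Int × Int × Int) : Decidable (Spec_calc_number_of_dimensions_py data validation out) := by unfold Spec_calc_number_of_dimensions_py; infer_instance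

-- ===== CLAIM (what is proved, stated in full; the proofs are below) =====
def Claim_equal_calc_number_of_dimensions_py : Prop := ∀ (data : List (Int × Int × Int)) (validation : Option (List (Int × Int × Int))), Dom_calc_number_of_dimensions_py data validation → Spec_calc_number_of_dimensions_py data validation (calc_number_of_dimensions_py data validation)

-- ===== LEMMAS AND PROOFS =====

-- A's conditional update is exactly Int max
lemma pv_if_gt_eq_max (a b : Int) : (if b > a then b else a) = max a b := by
  rw [max_def]; split_ifs <;> omega

-- A's fused fold computes the three column-wise running maxima
lemma pv_foldl_stepA (l : List (Int × Int × Int)) (s : Int × Int × Int) :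
    l.foldl pvStepA s =
      ((l.map (fun r => r.1)).foldl max s.1,
       (l.map (fun r => r.2.1)).foldl max s.2.1,
       (l.map (fun r => r.2.2)).foldl max s.2.2) := by
  induction l generalizing s with
  | nil => simp
  | cons r t ih =>
      simp only [List.map_cons, List.foldl_cons, ih, pvStepA, pv_if_gt_eq_max]

-- ===== VERDICT (by name: the statement is the Claim_ definition above) =====
theorem calc_number_of_dimensions_py_spec : Claim_equal_calc_number_of_dimensions_py := by
  intro data validation _
  show calc_number_of_dimensions_py data validation = calc_number_of_dimensions_py_alt data validation
  unfold calc_number_of_dimensions_py calc_number_of_dimensions_py_alt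
  cases validation with
  | none =>
      simp only [List.map_cons, PySem.List.max?_id_cons, Option.getD_some, List.append_nil,
        pv_foldl_stepA]
  | some v =>
      simp only [List.map_cons, PySem.List.max?_id_cons, Option.getD_some, List.map_append,
        List.foldl_append, pv_foldl_stepA]
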